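-- pv_equiv track=rewrite | github.com/mariyambj/HackerRank | doctor.py | total_amount
-- ===== SOURCE A (Python) =====
-- def total_amount(ages):
--     amount = 0
--     for age in ages:
--         if age < 17:
--             amount += 200
--         elif 17 <= age < 40:
--             amount += 400
--         else:
--             amount += 300
--     return amount
-- ===== SOURCE B (Python) =====
-- def total_amount(ages):
--     young = sum(1 for a in ages if a < 17)
--     mid = sum(1 for a in ages if 17 <= a < 40)
--     return 200 * young + 400 * mid + 300 * (len(ages) - young - mid)
-- ===== Notes on version B (the rewrite author's own statement) =====
-- stated objective: alternative
-- what changed: Replaces the single-pass branch-and-accumulate loop with bracket counting: count ages below 17 and ages in [17,40) and compute the total by the closed formula 200*young + 400*mid + 300*rest.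
import Mathlib
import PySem

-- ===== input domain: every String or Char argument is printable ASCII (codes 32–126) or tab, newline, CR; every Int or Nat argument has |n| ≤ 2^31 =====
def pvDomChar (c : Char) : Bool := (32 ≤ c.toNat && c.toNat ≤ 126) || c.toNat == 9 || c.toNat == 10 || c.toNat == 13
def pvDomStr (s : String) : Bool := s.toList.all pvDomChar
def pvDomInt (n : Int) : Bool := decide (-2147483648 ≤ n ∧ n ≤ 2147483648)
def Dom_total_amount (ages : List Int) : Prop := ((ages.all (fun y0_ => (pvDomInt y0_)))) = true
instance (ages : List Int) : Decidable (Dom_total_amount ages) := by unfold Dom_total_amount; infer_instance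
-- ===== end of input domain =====

-- ===== PORT A =====
-- A: fold over ages with an accumulator, branching per age as in the Python.
def total_amount (ages : List Int) : Int :=
  ages.foldl (fun amount age =>
    if age < 17 then amount + 200
    else if 17 ≤ age ∧ age < 40 then amount + 400
    else amount + 300) 0

-- ===== PORT B =====
-- B: count the two lower brackets once, then a closed formula.
def total_amount_alt (ages : List Int) : Int :=
  let young : Int := ages.countP (fun a => a < 17)
  let mid : Int := ages.countP (fun a => 17 ≤ a ∧ a < 40)
  200 * young + 400 * mid + 300 * ((ages.length : Int) - young - mid)

-- ===== PRECONDITION & SPEC =====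
def Spec_total_amount (ages : List Int) (out : Int) : Prop := out = total_amount_alt ages
instance (ages : List Int) (out : Int) : Decidable (Spec_total_amount ages out) := by unfold Spec_total_amount; infer_instance

-- ===== CLAIM (what is proved, stated in full; the proofs are below) =====
def Claim_equal_total_amount : Prop := ∀ (ages : List Int), Dom_total_amount ages → Spec_total_amount ages (total_amount ages)

-- ===== LEMMAS AND PROOFS =====

-- ===== VERDICT (by name: the statement is the Claim_ definition above) =====
lemma alt_cons (a : Int) (t : List Int) :
    total_amount_alt (a :: t)
    = (if a < 17 then (200:Int) else if 17 ≤ a ∧ a < 40 then 400 else 300) + total_amount_alt t := by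
  simp only [total_amount_alt, List.countP_cons, List.length_cons]
  by_cases h1 : a < 17
  · have h2 : ¬ (17 ≤ a ∧ a < 40) := by omega
    simp only [h1, h2]
    simp
    push_cast
    ring
  · by_cases h2 : 17 ≤ a ∧ a < 40
    · simp only [h1, h2]
      simp
      push_cast
      ring
    · simp only [h1, h2]
      simp
      push_cast
      ring

lemma total_amount_eq (ages : List Int) (acc : Int) :
    ages.foldl (fun amount age =>
      if age < 17 then amount + 200
      else if 17 ≤ age ∧ age < 40 then amount + 400
      else amount + 300) acc
    = acc + total_amount_alt ages := by
  induction ages generalizing acc with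
  | nil => simp [total_amount_alt]
  | cons a t ih =>
      rw [List.foldl_cons, ih, alt_cons]
      split_ifs <;> ring

theorem total_amount_spec : Claim_equal_total_amount := by
  intro ages _
  unfold Spec_total_amount total_amount
  rw [total_amount_eq]
  ring
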